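-- pv_equiv track=rewrite | github.com/AyushArtesian/spark-outreach | backend/app/services/web_scraper.py | _normalize_location_text
-- ===== SOURCE A (Python) =====
-- from typing import Any, Dict, Optional, List
--
-- LOCATION_ALIASES = {
--     "gurgoan": "gurgaon",
--     "gurugram": "gurgaon",
--     "banglore": "bangalore",
--     "bengalure": "bangalore",
--     "new delhi": "delhi",
-- }
--
-- def _normalize_location_text(value: Optional[str]) -> str:
--     """Normalize frequent city spelling variants for better search hit-rate."""
--     text = (value or "").strip().lower()
--     if not text:
--         return ""
--     normalized = text
--     for src, dst in LOCATION_ALIASES.items():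
--         normalized = normalized.replace(src, dst)
--     return normalized
-- ===== SOURCE B (Python) =====
-- import re
-- from typing import Optional
--
-- LOCATION_ALIASES = {
--     "gurgoan": "gurgaon",
--     "gurugram": "gurgaon",
--     "banglore": "bangalore",
--     "bengalure": "bangalore",
--     "new delhi": "delhi",
-- }
--
-- _ALIAS_PATTERN = re.compile("|".join(re.escape(k) for k in LOCATION_ALIASES))
--
-- def _normalize_location_text(value: Optional[str]) -> str:
--     """Normalize frequent city spelling variants for better search hit-rate."""
--     text = (value or "").strip().lower()
--     if not text:
--         return ""
--     return _ALIAS_PATTERN.sub(lambda m: LOCATION_ALIASES[m.group(0)], text)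
-- ===== Notes on version B (the rewrite author's own statement) =====
-- stated objective: idiomatic
-- what changed: Replaces the loop of five sequential full-string str.replace passes with one compiled alternation regex applied in a single left-to-right pass (pattern.sub with a table lookup).
-- intended difference: On inputs whose stripped lowercased text contains 'gurgoanew delhi' or 'gurugramew delhi', A's earlier gurgaon substitution cascades into a fresh 'new delhi' match (A returns e.g. 'gurgaodelhi'), while B's single pass leaves it (returns 'gurgaonew delhi'); B's non-cascading substitution is the intended alias normalization. — e.g. on _normalize_location_text(some "gurgoanew delhi"): A returns "gurgaodelhi", B returns "gurgaonew delhi"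
import Mathlib
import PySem

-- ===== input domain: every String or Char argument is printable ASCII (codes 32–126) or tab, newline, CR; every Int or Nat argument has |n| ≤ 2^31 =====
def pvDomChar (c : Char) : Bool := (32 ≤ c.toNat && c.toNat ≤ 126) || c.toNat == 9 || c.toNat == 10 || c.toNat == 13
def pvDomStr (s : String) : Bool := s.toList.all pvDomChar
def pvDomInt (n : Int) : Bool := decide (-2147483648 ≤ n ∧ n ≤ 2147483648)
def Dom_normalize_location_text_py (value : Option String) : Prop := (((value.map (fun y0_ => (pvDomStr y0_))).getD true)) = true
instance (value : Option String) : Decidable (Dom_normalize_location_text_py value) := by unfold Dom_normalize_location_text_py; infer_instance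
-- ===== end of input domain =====

-- B replaces A's five sequential full-string replace passes by one left-to-right
-- table-driven substitution pass (a compiled alternation regex in Python); on the two
-- cascade substrings (see D_ below) B intentionally differs from A.

-- ===== PORT A =====
-- LOCATION_ALIASES.items() in insertion order
def pvAliasesA : List (String × String) :=
  [("gurgoan", "gurgaon"), ("gurugram", "gurgaon"), ("banglore", "bangalore"),
   ("bengalure", "bangalore"), ("new delhi", "delhi")]

def normalize_location_text_py (value : Option String) : String :=
  let text := PySem.Str.lower (PySem.Str.strip (value.getD ""))
  if text = "" then ""
  else pvAliasesA.foldl (fun acc p => PySem.Str.replace acc p.1 p.2) text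

-- ===== PORT B =====
def pvAliasesB : List (List Char × List Char) :=
  [("gurgoan".toList, "gurgaon".toList), ("gurugram".toList, "gurgaon".toList),
   ("banglore".toList, "bangalore".toList), ("bengalure".toList, "bangalore".toList),
   ("new delhi".toList, "delhi".toList)]

-- Hand port of _ALIAS_PATTERN.sub on a literal-alternation pattern (PySem has no regex):
-- scan left to right, at each position try the alternatives in pattern order; on a match
-- emit the replacement and continue after the matched text. Exact for fuel ≥ length
-- (fuel only makes the recursion structural; the caller passes the length).
def pvScan : Nat → List Char → List Char
  | _, [] => []
  | 0, l => l
  | fuel+1, c :: t =>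
    match pvAliasesB.find? (fun p => p.1.isPrefixOf (c :: t)) with
    | some p => p.2 ++ pvScan fuel (t.drop (p.1.length - 1))
    | none => c :: pvScan fuel t

def normalize_location_text_py_alt (value : Option String) : String :=
  let text := PySem.Str.lower (PySem.Str.strip (value.getD ""))
  if text = "" then ""
  else String.ofList (pvScan text.toList.length text.toList)

-- ===== PRECONDITION & SPEC =====
-- On inputs whose stripped lowercased text contains "gurgoanew delhi" or "gurugramew delhi",
-- A's earlier gurgaon substitution cascades into a fresh "new delhi" match (A returns e.g.
-- "gurgaodelhi"), while B's single pass leaves it ("gurgaonew delhi"); B's non-cascading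
-- substitution is the intended alias normalization.
def D_normalize_location_text_py (value : Option String) : Prop :=
  PySem.Str.isIn "gurgoanew delhi" (PySem.Str.lower (PySem.Str.strip (value.getD ""))) = true ∨
  PySem.Str.isIn "gurugramew delhi" (PySem.Str.lower (PySem.Str.strip (value.getD ""))) = true
instance (value : Option String) : Decidable (D_normalize_location_text_py value) := by
  unfold D_normalize_location_text_py; infer_instance

def Spec_normalize_location_text_py (value : Option String) (out : String) : Prop :=
  ¬ D_normalize_location_text_py value → out = normalize_location_text_py_alt value
instance (value : Option String) (out : String) : Decidable (Spec_normalize_location_text_py value out) := by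
  unfold Spec_normalize_location_text_py; infer_instance

def pvDiffWitness_normalize_location_text_py : Option String := some "gurgoanew delhi"
def pvDiffWitnessOut_normalize_location_text_py : String × String := ("gurgaodelhi", "gurgaonew delhi")

-- ===== CLAIM (what is proved, stated in full; the proofs are below) =====
def Claim_unchanged_normalize_location_text_py : Prop :=
  ∀ (value : Option String), Dom_normalize_location_text_py value →
    Spec_normalize_location_text_py value (normalize_location_text_py value)
def Claim_changed_normalize_location_text_py : Prop :=
  Dom_normalize_location_text_py (pvDiffWitness_normalize_location_text_py) ∧
  D_normalize_location_text_py (pvDiffWitness_normalize_location_text_py) ∧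
  normalize_location_text_py (pvDiffWitness_normalize_location_text_py) = pvDiffWitnessOut_normalize_location_text_py.1 ∧
  normalize_location_text_py_alt (pvDiffWitness_normalize_location_text_py) = pvDiffWitnessOut_normalize_location_text_py.2 ∧
  pvDiffWitnessOut_normalize_location_text_py.1 ≠ pvDiffWitnessOut_normalize_location_text_py.2
def Claim_exact_normalize_location_text_py : Prop :=
  ∀ (value : Option String), Dom_normalize_location_text_py value →
    D_normalize_location_text_py value →
    normalize_location_text_py value ≠ normalize_location_text_py_alt value

-- ===== LEMMAS AND PROOFS =====

-- Python str.replace for a nonempty needle, as a structural left-to-right recursion.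
def pvRep (old new : List Char) : List Char → List Char
  | [] => []
  | c :: t =>
    if old.isPrefixOf (c :: t) then new ++ pvRep old new (t.drop (old.length - 1))
    else c :: pvRep old new t
termination_by l => l.length
decreasing_by
  all_goals simp

theorem pvRep_nil (old new : List Char) : pvRep old new [] = [] := by rw [pvRep]

theorem pvRep_cons_neg (old new : List Char) (c : Char) (t : List Char)
    (h : ¬ old <+: (c :: t)) : pvRep old new (c :: t) = c :: pvRep old new t := by
  rw [pvRep, if_neg (by simpa [List.isPrefixOf_iff_prefix] using h)]

theorem pvRep_match (old new : List Char) (s : List Char) (hold : old ≠ []) :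
    pvRep old new (old ++ s) = new ++ pvRep old new s := by
  cases old with
  | nil => exact absurd rfl hold
  | cons a o =>
    have hpre : (a :: o).isPrefixOf (a :: (o ++ s)) = true := by
      rw [List.isPrefixOf_iff_prefix, ← List.cons_append]
      exact List.prefix_append (a :: o) s
    rw [List.cons_append, pvRep, if_pos hpre]
    rw [show (a :: o).length - 1 = o.length by simp, List.drop_left]

theorem go_eq_pvRep (old new : List Char) (hold : old ≠ []) :
    ∀ fuel (l acc : List Char), l.length ≤ fuel →
      PySem.Chars.replace.go old new fuel l acc = acc.reverse ++ pvRep old new l := by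
  intro fuel
  induction fuel with
  | zero =>
    intro l acc hl
    have hnil : l = [] := List.eq_nil_of_length_eq_zero (by omega)
    subst hnil
    rw [PySem.Chars.replace.go, pvRep_nil]
  | succ f ih =>
    intro l acc hl
    cases l with
    | nil =>
      rw [PySem.Chars.replace.go, pvRep_nil] <;> simp
    | cons c t =>
      have holdlen : 1 ≤ old.length := by
        cases old with
        | nil => exact absurd rfl hold
        | cons a o => simp
      by_cases hp : old.isPrefixOf (c :: t)
      · rw [PySem.Chars.replace.go, if_pos hp]
        rw [ih _ _ (by simp at hl ⊢; omega)]
        rw [pvRep, if_pos hp]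
        have hdrop : (c :: t).drop old.length = t.drop (old.length - 1) := by
          cases old with
          | nil => exact absurd rfl hold
          | cons a o => simp
        rw [hdrop]
        simp
      · rw [PySem.Chars.replace.go, if_neg hp]
        rw [ih _ _ (by simp at hl ⊢; omega)]
        rw [pvRep, if_neg hp]
        simp

theorem replace_eq_pvRep (s old new : List Char) (hold : old ≠ []) :
    PySem.Chars.replace s old new = pvRep old new s := by
  rw [PySem.Chars.replace, if_neg (by simpa [List.isEmpty_iff] using hold)]
  simpa using go_eq_pvRep old new hold s.length s [] le_rfl

theorem not_prefix_append (k a x : List Char) (h1 : ¬ a <+: k) (h2 : ¬ k <+: a) :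
    ¬ k <+: a ++ x :=
  fun h => (List.prefix_or_prefix_of_prefix h (List.prefix_append _ _)).elim h2 h1

theorem pvRep_chunk (old new c x : List Char)
    (h : ∀ i < c.length, ¬ old <+: (c.drop i ++ x)) :
    pvRep old new (c ++ x) = c ++ pvRep old new x := by
  induction c with
  | nil => simp
  | cons a c ih =>
    rw [List.cons_append, pvRep_cons_neg old new a (c ++ x)
      (by simpa using h 0 (by simp))]
    rw [ih (fun i hi => by simpa using h (i + 1) (by simpa using hi))]
    rfl

theorem pvRep_chunk_easy (old new c x : List Char)
    (h : ∀ i < c.length, ¬(c.drop i <+: old) ∧ ¬(old <+: c.drop i)) :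
    pvRep old new (c ++ x) = c ++ pvRep old new x :=
  pvRep_chunk old new c x (fun i hi => not_prefix_append old (c.drop i) x (h i hi).1 (h i hi).2)

theorem pvRep_prefix_pull (old d : List Char) :
    ∀ n (t p : List Char), t.length ≤ n →
      (∀ j < p.length, ¬(p.drop j <+: d) ∧ ¬(d <+: p.drop j)) →
      p <+: pvRep old d t → p <+: t := by
  intro n
  induction n with
  | zero =>
    intro t p ht hpd hp
    have hnil : t = [] := List.eq_nil_of_length_eq_zero (by omega)
    subst hnil
    rw [pvRep_nil] at hp
    exact hp
  | succ n ih =>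
    intro t p ht hpd hp
    cases t with
    | nil =>
      rw [pvRep_nil] at hp
      exact hp
    | cons c t =>
      by_cases hm : old <+: (c :: t)
      · rw [pvRep, if_pos (by simpa [List.isPrefixOf_iff_prefix] using hm)] at hp
        cases p with
        | nil => exact List.nil_prefix
        | cons q p' =>
          rcases List.prefix_or_prefix_of_prefix hp (List.prefix_append d _) with h' | h'
          · exact absurd h' ((hpd 0 (by simp)).1)
          · exact absurd h' ((hpd 0 (by simp)).2)
      · rw [pvRep_cons_neg old d c t hm] at hp
        cases p with
        | nil => exact List.nil_prefix
        | cons q p' =>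
          rw [List.cons_prefix_cons] at hp
          refine List.cons_prefix_cons.mpr ⟨hp.1, ?_⟩
          exact ih t p' (by simpa using ht) (fun j hj => by simpa using hpd (j + 1) (by simpa using hj)) hp.2

theorem pull' (old d p t : List Char)
    (hpd : ∀ j < p.length, ¬(p.drop j <+: d) ∧ ¬(d <+: p.drop j))
    (h : p <+: pvRep old d t) : p <+: t :=
  pvRep_prefix_pull old d t.length t p le_rfl hpd h

theorem not_cons_prefix_rep (old d : List Char) (ch : Char) (p : List Char) (c : Char) (t : List Char)
    (hpd : ∀ j < p.length, ¬(p.drop j <+: d) ∧ ¬(d <+: p.drop j))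
    (h : ¬ (ch :: p) <+: (c :: t)) : ¬ (ch :: p) <+: (c :: pvRep old d t) := by
  intro hp
  rw [List.cons_prefix_cons] at hp
  exact h (List.cons_prefix_cons.mpr ⟨hp.1, pull' old d p t hpd hp.2⟩)

theorem rep5_gurgaon (X : List Char) (h : ¬ ("ew delhi".toList <+: X)) :
    pvRep "new delhi".toList "delhi".toList ("gurgaon".toList ++ X) =
      "gurgaon".toList ++ pvRep "new delhi".toList "delhi".toList X := by
  apply pvRep_chunk
  intro i hi
  have hi7 : i < 7 := by simpa using hi
  interval_cases i
  · exact not_prefix_append _ _ _ (by decide) (by decide)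
  · exact not_prefix_append _ _ _ (by decide) (by decide)
  · exact not_prefix_append _ _ _ (by decide) (by decide)
  · exact not_prefix_append _ _ _ (by decide) (by decide)
  · exact not_prefix_append _ _ _ (by decide) (by decide)
  · exact not_prefix_append _ _ _ (by decide) (by decide)
  · intro hp
    rw [show "gurgaon".toList.drop 6 ++ X = 'n' :: X from rfl,
        show "new delhi".toList = 'n' :: "ew delhi".toList from rfl,
        List.cons_prefix_cons] at hp
    exact h hp.2

-- A's composed five replaces
def pvF (l : List Char) : List Char :=
  pvRep "new delhi".toList "delhi".toList
    (pvRep "bengalure".toList "bangalore".toList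
      (pvRep "banglore".toList "bangalore".toList
        (pvRep "gurugram".toList "gurgaon".toList
          (pvRep "gurgoan".toList "gurgaon".toList l))))

theorem pvScan_nil (f : Nat) : pvScan f [] = [] := by cases f <;> rfl

theorem pvScan_match1 (f : Nat) (s : List Char) :
    pvScan (f+1) ("gurgoan".toList ++ s) = "gurgaon".toList ++ pvScan f s := by
  rw [show "gurgoan".toList ++ s = 'g' :: ("urgoan".toList ++ s) from rfl, pvScan]
  simp [pvAliasesB, List.isPrefixOf]

theorem pvScan_match2 (f : Nat) (s : List Char) :
    pvScan (f+1) ("gurugram".toList ++ s) = "gurgaon".toList ++ pvScan f s := by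
  rw [show "gurugram".toList ++ s = 'g' :: ("urugram".toList ++ s) from rfl, pvScan]
  simp [pvAliasesB, List.isPrefixOf]

theorem pvScan_match3 (f : Nat) (s : List Char) :
    pvScan (f+1) ("banglore".toList ++ s) = "bangalore".toList ++ pvScan f s := by
  rw [show "banglore".toList ++ s = 'b' :: ("anglore".toList ++ s) from rfl, pvScan]
  simp [pvAliasesB, List.isPrefixOf]

theorem pvScan_match4 (f : Nat) (s : List Char) :
    pvScan (f+1) ("bengalure".toList ++ s) = "bangalore".toList ++ pvScan f s := by
  rw [show "bengalure".toList ++ s = 'b' :: ("engalure".toList ++ s) from rfl, pvScan]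
  simp [pvAliasesB, List.isPrefixOf]

theorem pvScan_match5 (f : Nat) (s : List Char) :
    pvScan (f+1) ("new delhi".toList ++ s) = "delhi".toList ++ pvScan f s := by
  rw [show "new delhi".toList ++ s = 'n' :: ("ew delhi".toList ++ s) from rfl, pvScan]
  simp [pvAliasesB, List.isPrefixOf]

theorem pvScan_cons_none (f : Nat) (c : Char) (t : List Char)
    (h1 : ¬ "gurgoan".toList <+: (c :: t)) (h2 : ¬ "gurugram".toList <+: (c :: t))
    (h3 : ¬ "banglore".toList <+: (c :: t)) (h4 : ¬ "bengalure".toList <+: (c :: t))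
    (h5 : ¬ "new delhi".toList <+: (c :: t)) :
    pvScan (f+1) (c :: t) = c :: pvScan f t := by
  have hf : pvAliasesB.find? (fun p => p.1.isPrefixOf (c :: t)) = none := by
    rw [pvAliasesB]
    rw [List.find?_cons_of_neg (h := by simpa [List.isPrefixOf_iff_prefix] using h1)]
    rw [List.find?_cons_of_neg (h := by simpa [List.isPrefixOf_iff_prefix] using h2)]
    rw [List.find?_cons_of_neg (h := by simpa [List.isPrefixOf_iff_prefix] using h3)]
    rw [List.find?_cons_of_neg (h := by simpa [List.isPrefixOf_iff_prefix] using h4)]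
    rw [List.find?_cons_of_neg (h := by simpa [List.isPrefixOf_iff_prefix] using h5)]
    rfl
  rw [pvScan, hf]


theorem pvMain : ∀ fuel (l : List Char), l.length ≤ fuel →
    ¬ ("gurgoanew delhi".toList <:+: l) → ¬ ("gurugramew delhi".toList <:+: l) →
    pvF l = pvScan fuel l := by
  intro fuel
  induction fuel with
  | zero =>
    intro l hl _ _
    have hnil : l = [] := List.eq_nil_of_length_eq_zero (by omega)
    subst hnil
    rw [pvScan_nil]
    simp [pvF, pvRep_nil]
  | succ f ih =>
    intro l hl hb1 hb2
    cases l with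
    | nil =>
      rw [pvScan_nil]
      simp [pvF, pvRep_nil]
    | cons c t =>
      by_cases h1 : "gurgoan".toList <+: (c :: t)
      · obtain ⟨s, hs⟩ := h1
        rw [← hs] at hl hb1 hb2 ⊢
        have hew : ¬ "ew delhi".toList <+: s := by
          intro hp
          obtain ⟨r, hr⟩ := hp
          exact hb1 ⟨[], r, by rw [← hr]; rfl⟩
        have hX : ¬ "ew delhi".toList <+:
            pvRep "bengalure".toList "bangalore".toList
              (pvRep "banglore".toList "bangalore".toList
                (pvRep "gurugram".toList "gurgaon".toList
                  (pvRep "gurgoan".toList "gurgaon".toList s))) := by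
          intro hp
          exact hew (pull' _ _ _ _ (by decide) (pull' _ _ _ _ (by decide)
            (pull' _ _ _ _ (by decide) (pull' _ _ _ _ (by decide) hp))))
        unfold pvF
        rw [pvRep_match "gurgoan".toList "gurgaon".toList s (by decide)]
        rw [pvRep_chunk_easy "gurugram".toList "gurgaon".toList "gurgaon".toList _ (by decide)]
        rw [pvRep_chunk_easy "banglore".toList "bangalore".toList "gurgaon".toList _ (by decide)]
        rw [pvRep_chunk_easy "bengalure".toList "bangalore".toList "gurgaon".toList _ (by decide)]
        rw [rep5_gurgaon _ hX]
        rw [pvScan_match1]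
        have hss : s.length ≤ f := by simp at hl; omega
        rw [← ih s hss (fun hq => hb1 (hq.trans (List.suffix_append _ s).isInfix))
              (fun hq => hb2 (hq.trans (List.suffix_append _ s).isInfix))]
        rfl
      · by_cases h2 : "gurugram".toList <+: (c :: t)
        · obtain ⟨s, hs⟩ := h2
          rw [← hs] at hl hb1 hb2 ⊢
          have hew : ¬ "ew delhi".toList <+: s := by
            intro hp
            obtain ⟨r, hr⟩ := hp
            exact hb2 ⟨[], r, by rw [← hr]; rfl⟩
          have hX : ¬ "ew delhi".toList <+:
              pvRep "bengalure".toList "bangalore".toList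
                (pvRep "banglore".toList "bangalore".toList
                  (pvRep "gurugram".toList "gurgaon".toList
                    (pvRep "gurgoan".toList "gurgaon".toList s))) := by
            intro hp
            exact hew (pull' _ _ _ _ (by decide) (pull' _ _ _ _ (by decide)
              (pull' _ _ _ _ (by decide) (pull' _ _ _ _ (by decide) hp))))
          unfold pvF
          rw [pvRep_chunk_easy "gurgoan".toList "gurgaon".toList "gurugram".toList _ (by decide)]
          rw [pvRep_match "gurugram".toList "gurgaon".toList _ (by decide)]
          rw [pvRep_chunk_easy "banglore".toList "bangalore".toList "gurgaon".toList _ (by decide)]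
          rw [pvRep_chunk_easy "bengalure".toList "bangalore".toList "gurgaon".toList _ (by decide)]
          rw [rep5_gurgaon _ hX]
          rw [pvScan_match2]
          have hss : s.length ≤ f := by simp at hl; omega
          rw [← ih s hss (fun hq => hb1 (hq.trans (List.suffix_append _ s).isInfix))
                (fun hq => hb2 (hq.trans (List.suffix_append _ s).isInfix))]
          rfl
        · by_cases h3 : "banglore".toList <+: (c :: t)
          · obtain ⟨s, hs⟩ := h3
            rw [← hs] at hl hb1 hb2 ⊢
            unfold pvF
            rw [pvRep_chunk_easy "gurgoan".toList "gurgaon".toList "banglore".toList _ (by decide)]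
            rw [pvRep_chunk_easy "gurugram".toList "gurgaon".toList "banglore".toList _ (by decide)]
            rw [pvRep_match "banglore".toList "bangalore".toList _ (by decide)]
            rw [pvRep_chunk_easy "bengalure".toList "bangalore".toList "bangalore".toList _ (by decide)]
            rw [pvRep_chunk_easy "new delhi".toList "delhi".toList "bangalore".toList _ (by decide)]
            rw [pvScan_match3]
            have hss : s.length ≤ f := by simp at hl; omega
            rw [← ih s hss (fun hq => hb1 (hq.trans (List.suffix_append _ s).isInfix))
                  (fun hq => hb2 (hq.trans (List.suffix_append _ s).isInfix))]
            rfl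
          · by_cases h4 : "bengalure".toList <+: (c :: t)
            · obtain ⟨s, hs⟩ := h4
              rw [← hs] at hl hb1 hb2 ⊢
              unfold pvF
              rw [pvRep_chunk_easy "gurgoan".toList "gurgaon".toList "bengalure".toList _ (by decide)]
              rw [pvRep_chunk_easy "gurugram".toList "gurgaon".toList "bengalure".toList _ (by decide)]
              rw [pvRep_chunk_easy "banglore".toList "bangalore".toList "bengalure".toList _ (by decide)]
              rw [pvRep_match "bengalure".toList "bangalore".toList _ (by decide)]
              rw [pvRep_chunk_easy "new delhi".toList "delhi".toList "bangalore".toList _ (by decide)]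
              rw [pvScan_match4]
              have hss : s.length ≤ f := by simp at hl; omega
              rw [← ih s hss (fun hq => hb1 (hq.trans (List.suffix_append _ s).isInfix))
                    (fun hq => hb2 (hq.trans (List.suffix_append _ s).isInfix))]
              rfl
            · by_cases h5 : "new delhi".toList <+: (c :: t)
              · obtain ⟨s, hs⟩ := h5
                rw [← hs] at hl hb1 hb2 ⊢
                unfold pvF
                rw [pvRep_chunk_easy "gurgoan".toList "gurgaon".toList "new delhi".toList _ (by decide)]
                rw [pvRep_chunk_easy "gurugram".toList "gurgaon".toList "new delhi".toList _ (by decide)]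
                rw [pvRep_chunk_easy "banglore".toList "bangalore".toList "new delhi".toList _ (by decide)]
                rw [pvRep_chunk_easy "bengalure".toList "bangalore".toList "new delhi".toList _ (by decide)]
                rw [pvRep_match "new delhi".toList "delhi".toList _ (by decide)]
                rw [pvScan_match5]
                have hss : s.length ≤ f := by simp at hl; omega
                rw [← ih s hss (fun hq => hb1 (hq.trans (List.suffix_append _ s).isInfix))
                      (fun hq => hb2 (hq.trans (List.suffix_append _ s).isInfix))]
                rfl
              · have g2 : ¬ "gurugram".toList <+: c :: pvRep "gurgoan".toList "gurgaon".toList t :=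
                  not_cons_prefix_rep _ _ 'g' "urugram".toList c t (by decide) h2
                have g3 : ¬ "banglore".toList <+:
                    c :: pvRep "gurugram".toList "gurgaon".toList (pvRep "gurgoan".toList "gurgaon".toList t) :=
                  not_cons_prefix_rep _ _ 'b' "anglore".toList c _ (by decide)
                    (not_cons_prefix_rep _ _ 'b' "anglore".toList c t (by decide) h3)
                have g4 : ¬ "bengalure".toList <+:
                    c :: pvRep "banglore".toList "bangalore".toList
                      (pvRep "gurugram".toList "gurgaon".toList (pvRep "gurgoan".toList "gurgaon".toList t)) :=
                  not_cons_prefix_rep _ _ 'b' "engalure".toList c _ (by decide)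
                    (not_cons_prefix_rep _ _ 'b' "engalure".toList c _ (by decide)
                      (not_cons_prefix_rep _ _ 'b' "engalure".toList c t (by decide) h4))
                have g5 : ¬ "new delhi".toList <+:
                    c :: pvRep "bengalure".toList "bangalore".toList
                      (pvRep "banglore".toList "bangalore".toList
                        (pvRep "gurugram".toList "gurgaon".toList (pvRep "gurgoan".toList "gurgaon".toList t))) :=
                  not_cons_prefix_rep _ _ 'n' "ew delhi".toList c _ (by decide)
                    (not_cons_prefix_rep _ _ 'n' "ew delhi".toList c _ (by decide)
                      (not_cons_prefix_rep _ _ 'n' "ew delhi".toList c _ (by decide)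
                        (not_cons_prefix_rep _ _ 'n' "ew delhi".toList c t (by decide) h5)))
                unfold pvF
                rw [pvRep_cons_neg _ _ _ _ h1, pvRep_cons_neg _ _ _ _ g2, pvRep_cons_neg _ _ _ _ g3,
                    pvRep_cons_neg _ _ _ _ g4, pvRep_cons_neg _ _ _ _ g5]
                rw [pvScan_cons_none f c t h1 h2 h3 h4 h5]
                have hss : t.length ≤ f := by simp at hl; omega
                rw [← ih t hss (fun hq => hb1 (hq.trans (List.suffix_cons c t).isInfix))
                      (fun hq => hb2 (hq.trans (List.suffix_cons c t).isInfix))]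
                rfl


theorem infix_append_cases (bad k s : List Char) :
    bad <:+: (k ++ s) → (∃ j < k.length, bad <+: k.drop j ++ s) ∨ bad <:+: s := by
  induction k with
  | nil => intro h; right; simpa using h
  | cons a k ihk =>
    intro h
    rw [List.cons_append, List.infix_cons_iff] at h
    rcases h with h | h
    · exact Or.inl ⟨0, by simp, by simpa using h⟩
    · rcases ihk h with ⟨j, hj, hp⟩ | h
      · exact Or.inl ⟨j + 1, by simpa using hj, by simpa using hp⟩
      · exact Or.inr h

theorem rep5_cascade (X : List Char) :
    pvRep "new delhi".toList "delhi".toList ("gurgaon".toList ++ ("ew delhi".toList ++ X)) =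
      "gurgao".toList ++ ("delhi".toList ++ pvRep "new delhi".toList "delhi".toList X) := by
  rw [show "gurgaon".toList ++ ("ew delhi".toList ++ X)
        = "gurgao".toList ++ ("new delhi".toList ++ X) from rfl]
  rw [pvRep_chunk_easy "new delhi".toList "delhi".toList "gurgao".toList _ (by decide)]
  rw [pvRep_match "new delhi".toList "delhi".toList _ (by decide)]

theorem pv_head_ne (w z : List Char)
    (heq : "gurgao".toList ++ ("delhi".toList ++ w) = "gurgaon".toList ++ z) : False := by
  have hL : ("gurgao".toList ++ ("delhi".toList ++ w))[6]? = some 'd' := rfl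
  have hR : ("gurgaon".toList ++ z)[6]? = some 'n' := rfl
  have hdn : (some 'd' : Option Char) = some 'n' := by
    rw [← hL, ← hR]
    exact congrArg (fun l : List Char => l[6]?) heq
  exact absurd hdn (by decide)

theorem pvMainNe : ∀ fuel (l : List Char), l.length ≤ fuel →
    ("gurgoanew delhi".toList <:+: l ∨ "gurugramew delhi".toList <:+: l) →
    pvF l ≠ pvScan fuel l := by
  intro fuel
  induction fuel with
  | zero =>
    intro l hl hbad
    have hnil : l = [] := List.eq_nil_of_length_eq_zero (by omega)
    subst hnil
    rcases hbad with hb | hb <;> exact absurd (List.eq_nil_of_infix_nil hb) (by decide)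
  | succ f ih =>
    intro l hl hbad
    cases l with
    | nil =>
      rcases hbad with hb | hb <;> exact absurd (List.eq_nil_of_infix_nil hb) (by decide)
    | cons c t =>
      by_cases h1 : "gurgoan".toList <+: (c :: t)
      · obtain ⟨s, hs⟩ := h1
        rw [← hs] at hl hbad ⊢
        by_cases hew : "ew delhi".toList <+: s
        · obtain ⟨r, hr⟩ := hew
          rw [← hr] at hl ⊢
          unfold pvF
          rw [pvRep_match "gurgoan".toList "gurgaon".toList _ (by decide)]
          rw [pvRep_chunk_easy "gurgoan".toList "gurgaon".toList "ew delhi".toList _ (by decide)]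
          rw [pvRep_chunk_easy "gurugram".toList "gurgaon".toList "gurgaon".toList _ (by decide)]
          rw [pvRep_chunk_easy "gurugram".toList "gurgaon".toList "ew delhi".toList _ (by decide)]
          rw [pvRep_chunk_easy "banglore".toList "bangalore".toList "gurgaon".toList _ (by decide)]
          rw [pvRep_chunk_easy "banglore".toList "bangalore".toList "ew delhi".toList _ (by decide)]
          rw [pvRep_chunk_easy "bengalure".toList "bangalore".toList "gurgaon".toList _ (by decide)]
          rw [pvRep_chunk_easy "bengalure".toList "bangalore".toList "ew delhi".toList _ (by decide)]
          rw [rep5_cascade]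
          rw [pvScan_match1]
          intro heq
          exact pv_head_ne _ _ heq
        · have hbads : "gurgoanew delhi".toList <:+: s ∨ "gurugramew delhi".toList <:+: s := by
            rcases hbad with hb | hb
            · rcases infix_append_cases _ _ _ hb with ⟨j, hj, hp⟩ | h
              · cases j with
                | zero =>
                  have hp' : "gurgoan".toList ++ "ew delhi".toList <+: "gurgoan".toList ++ s := hp
                  exact absurd ((List.prefix_append_right_inj _).mp hp') hew
                | succ j =>
                  have hj6 : j < 6 := by simp at hj; omega
                  interval_cases j <;>
                    rcases List.prefix_or_prefix_of_prefix hp (List.prefix_append _ _) with h' | h' <;>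
                      exact absurd h' (by decide)
              · exact Or.inl h
            · rcases infix_append_cases _ _ _ hb with ⟨j, hj, hp⟩ | h
              · have hj7 : j < 7 := by simpa using hj
                interval_cases j <;>
                  rcases List.prefix_or_prefix_of_prefix hp (List.prefix_append _ _) with h' | h' <;>
                    exact absurd h' (by decide)
              · exact Or.inr h
          have hX : ¬ "ew delhi".toList <+:
              pvRep "bengalure".toList "bangalore".toList
                (pvRep "banglore".toList "bangalore".toList
                  (pvRep "gurugram".toList "gurgaon".toList
                    (pvRep "gurgoan".toList "gurgaon".toList s))) := by
            intro hp
            exact hew (pull' _ _ _ _ (by decide) (pull' _ _ _ _ (by decide)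
              (pull' _ _ _ _ (by decide) (pull' _ _ _ _ (by decide) hp))))
          unfold pvF
          rw [pvRep_match "gurgoan".toList "gurgaon".toList s (by decide)]
          rw [pvRep_chunk_easy "gurugram".toList "gurgaon".toList "gurgaon".toList _ (by decide)]
          rw [pvRep_chunk_easy "banglore".toList "bangalore".toList "gurgaon".toList _ (by decide)]
          rw [pvRep_chunk_easy "bengalure".toList "bangalore".toList "gurgaon".toList _ (by decide)]
          rw [rep5_gurgaon _ hX]
          rw [pvScan_match1]
          intro heq
          exact ih s (by simp at hl; omega) hbads (List.append_cancel_left heq)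
      · by_cases h2 : "gurugram".toList <+: (c :: t)
        · obtain ⟨s, hs⟩ := h2
          rw [← hs] at hl hbad ⊢
          by_cases hew : "ew delhi".toList <+: s
          · obtain ⟨r, hr⟩ := hew
            rw [← hr] at hl ⊢
            unfold pvF
            rw [pvRep_chunk_easy "gurgoan".toList "gurgaon".toList "gurugram".toList _ (by decide)]
            rw [pvRep_chunk_easy "gurgoan".toList "gurgaon".toList "ew delhi".toList _ (by decide)]
            rw [pvRep_match "gurugram".toList "gurgaon".toList _ (by decide)]
            rw [pvRep_chunk_easy "gurugram".toList "gurgaon".toList "ew delhi".toList _ (by decide)]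
            rw [pvRep_chunk_easy "banglore".toList "bangalore".toList "gurgaon".toList _ (by decide)]
            rw [pvRep_chunk_easy "banglore".toList "bangalore".toList "ew delhi".toList _ (by decide)]
            rw [pvRep_chunk_easy "bengalure".toList "bangalore".toList "gurgaon".toList _ (by decide)]
            rw [pvRep_chunk_easy "bengalure".toList "bangalore".toList "ew delhi".toList _ (by decide)]
            rw [rep5_cascade]
            rw [pvScan_match2]
            intro heq
            exact pv_head_ne _ _ heq
          · have hbads : "gurgoanew delhi".toList <:+: s ∨ "gurugramew delhi".toList <:+: s := by
              rcases hbad with hb | hb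
              · rcases infix_append_cases _ _ _ hb with ⟨j, hj, hp⟩ | h
                · have hj8 : j < 8 := by simpa using hj
                  interval_cases j <;>
                    rcases List.prefix_or_prefix_of_prefix hp (List.prefix_append _ _) with h' | h' <;>
                      exact absurd h' (by decide)
                · exact Or.inl h
              · rcases infix_append_cases _ _ _ hb with ⟨j, hj, hp⟩ | h
                · cases j with
                  | zero =>
                    have hp' : "gurugram".toList ++ "ew delhi".toList <+: "gurugram".toList ++ s := hp
                    exact absurd ((List.prefix_append_right_inj _).mp hp') hew
                  | succ j =>
                    have hj7 : j < 7 := by simp at hj; omega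
                    interval_cases j <;>
                      rcases List.prefix_or_prefix_of_prefix hp (List.prefix_append _ _) with h' | h' <;>
                        exact absurd h' (by decide)
                · exact Or.inr h
            have hX : ¬ "ew delhi".toList <+:
                pvRep "bengalure".toList "bangalore".toList
                  (pvRep "banglore".toList "bangalore".toList
                    (pvRep "gurugram".toList "gurgaon".toList
                      (pvRep "gurgoan".toList "gurgaon".toList s))) := by
              intro hp
              exact hew (pull' _ _ _ _ (by decide) (pull' _ _ _ _ (by decide)
                (pull' _ _ _ _ (by decide) (pull' _ _ _ _ (by decide) hp))))
            unfold pvF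
            rw [pvRep_chunk_easy "gurgoan".toList "gurgaon".toList "gurugram".toList _ (by decide)]
            rw [pvRep_match "gurugram".toList "gurgaon".toList _ (by decide)]
            rw [pvRep_chunk_easy "banglore".toList "bangalore".toList "gurgaon".toList _ (by decide)]
            rw [pvRep_chunk_easy "bengalure".toList "bangalore".toList "gurgaon".toList _ (by decide)]
            rw [rep5_gurgaon _ hX]
            rw [pvScan_match2]
            intro heq
            exact ih s (by simp at hl; omega) hbads (List.append_cancel_left heq)
        · by_cases h3 : "banglore".toList <+: (c :: t)
          · obtain ⟨s, hs⟩ := h3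
            rw [← hs] at hl hbad ⊢
            have hbads : "gurgoanew delhi".toList <:+: s ∨ "gurugramew delhi".toList <:+: s := by
              rcases hbad with hb | hb <;> rcases infix_append_cases _ _ _ hb with ⟨j, hj, hp⟩ | h
              · have hj8 : j < 8 := by simpa using hj
                interval_cases j <;>
                  rcases List.prefix_or_prefix_of_prefix hp (List.prefix_append _ _) with h' | h' <;>
                    exact absurd h' (by decide)
              · exact Or.inl h
              · have hj8 : j < 8 := by simpa using hj
                interval_cases j <;>
                  rcases List.prefix_or_prefix_of_prefix hp (List.prefix_append _ _) with h' | h' <;>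
                    exact absurd h' (by decide)
              · exact Or.inr h
            unfold pvF
            rw [pvRep_chunk_easy "gurgoan".toList "gurgaon".toList "banglore".toList _ (by decide)]
            rw [pvRep_chunk_easy "gurugram".toList "gurgaon".toList "banglore".toList _ (by decide)]
            rw [pvRep_match "banglore".toList "bangalore".toList _ (by decide)]
            rw [pvRep_chunk_easy "bengalure".toList "bangalore".toList "bangalore".toList _ (by decide)]
            rw [pvRep_chunk_easy "new delhi".toList "delhi".toList "bangalore".toList _ (by decide)]
            rw [pvScan_match3]
            intro heq
            exact ih s (by simp at hl; omega) hbads (List.append_cancel_left heq)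
          · by_cases h4 : "bengalure".toList <+: (c :: t)
            · obtain ⟨s, hs⟩ := h4
              rw [← hs] at hl hbad ⊢
              have hbads : "gurgoanew delhi".toList <:+: s ∨ "gurugramew delhi".toList <:+: s := by
                rcases hbad with hb | hb <;> rcases infix_append_cases _ _ _ hb with ⟨j, hj, hp⟩ | h
                · have hj9 : j < 9 := by simpa using hj
                  interval_cases j <;>
                    rcases List.prefix_or_prefix_of_prefix hp (List.prefix_append _ _) with h' | h' <;>
                      exact absurd h' (by decide)
                · exact Or.inl h
                · have hj9 : j < 9 := by simpa using hj
                  interval_cases j <;>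
                    rcases List.prefix_or_prefix_of_prefix hp (List.prefix_append _ _) with h' | h' <;>
                      exact absurd h' (by decide)
                · exact Or.inr h
              unfold pvF
              rw [pvRep_chunk_easy "gurgoan".toList "gurgaon".toList "bengalure".toList _ (by decide)]
              rw [pvRep_chunk_easy "gurugram".toList "gurgaon".toList "bengalure".toList _ (by decide)]
              rw [pvRep_chunk_easy "banglore".toList "bangalore".toList "bengalure".toList _ (by decide)]
              rw [pvRep_match "bengalure".toList "bangalore".toList _ (by decide)]
              rw [pvRep_chunk_easy "new delhi".toList "delhi".toList "bangalore".toList _ (by decide)]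
              rw [pvScan_match4]
              intro heq
              exact ih s (by simp at hl; omega) hbads (List.append_cancel_left heq)
            · by_cases h5 : "new delhi".toList <+: (c :: t)
              · obtain ⟨s, hs⟩ := h5
                rw [← hs] at hl hbad ⊢
                have hbads : "gurgoanew delhi".toList <:+: s ∨ "gurugramew delhi".toList <:+: s := by
                  rcases hbad with hb | hb <;> rcases infix_append_cases _ _ _ hb with ⟨j, hj, hp⟩ | h
                  · have hj9 : j < 9 := by simpa using hj
                    interval_cases j <;>
                      rcases List.prefix_or_prefix_of_prefix hp (List.prefix_append _ _) with h' | h' <;>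
                        exact absurd h' (by decide)
                  · exact Or.inl h
                  · have hj9 : j < 9 := by simpa using hj
                    interval_cases j <;>
                      rcases List.prefix_or_prefix_of_prefix hp (List.prefix_append _ _) with h' | h' <;>
                        exact absurd h' (by decide)
                  · exact Or.inr h
                unfold pvF
                rw [pvRep_chunk_easy "gurgoan".toList "gurgaon".toList "new delhi".toList _ (by decide)]
                rw [pvRep_chunk_easy "gurugram".toList "gurgaon".toList "new delhi".toList _ (by decide)]
                rw [pvRep_chunk_easy "banglore".toList "bangalore".toList "new delhi".toList _ (by decide)]
                rw [pvRep_chunk_easy "bengalure".toList "bangalore".toList "new delhi".toList _ (by decide)]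
                rw [pvRep_match "new delhi".toList "delhi".toList _ (by decide)]
                rw [pvScan_match5]
                intro heq
                exact ih s (by simp at hl; omega) hbads (List.append_cancel_left heq)
              · have hbt : "gurgoanew delhi".toList <:+: t ∨ "gurugramew delhi".toList <:+: t := by
                  rcases hbad with hb | hb
                  · rw [List.infix_cons_iff] at hb
                    rcases hb with hb | hb
                    · exact absurd (List.IsPrefix.trans (by decide) hb) h1
                    · exact Or.inl hb
                  · rw [List.infix_cons_iff] at hb
                    rcases hb with hb | hb
                    · exact absurd (List.IsPrefix.trans (by decide) hb) h2
                    · exact Or.inr hb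
                have g2 : ¬ "gurugram".toList <+: c :: pvRep "gurgoan".toList "gurgaon".toList t :=
                  not_cons_prefix_rep _ _ 'g' "urugram".toList c t (by decide) h2
                have g3 : ¬ "banglore".toList <+:
                    c :: pvRep "gurugram".toList "gurgaon".toList (pvRep "gurgoan".toList "gurgaon".toList t) :=
                  not_cons_prefix_rep _ _ 'b' "anglore".toList c _ (by decide)
                    (not_cons_prefix_rep _ _ 'b' "anglore".toList c t (by decide) h3)
                have g4 : ¬ "bengalure".toList <+:
                    c :: pvRep "banglore".toList "bangalore".toList
                      (pvRep "gurugram".toList "gurgaon".toList (pvRep "gurgoan".toList "gurgaon".toList t)) :=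
                  not_cons_prefix_rep _ _ 'b' "engalure".toList c _ (by decide)
                    (not_cons_prefix_rep _ _ 'b' "engalure".toList c _ (by decide)
                      (not_cons_prefix_rep _ _ 'b' "engalure".toList c t (by decide) h4))
                have g5 : ¬ "new delhi".toList <+:
                    c :: pvRep "bengalure".toList "bangalore".toList
                      (pvRep "banglore".toList "bangalore".toList
                        (pvRep "gurugram".toList "gurgaon".toList (pvRep "gurgoan".toList "gurgaon".toList t))) :=
                  not_cons_prefix_rep _ _ 'n' "ew delhi".toList c _ (by decide)
                    (not_cons_prefix_rep _ _ 'n' "ew delhi".toList c _ (by decide)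
                      (not_cons_prefix_rep _ _ 'n' "ew delhi".toList c _ (by decide)
                        (not_cons_prefix_rep _ _ 'n' "ew delhi".toList c t (by decide) h5)))
                unfold pvF
                rw [pvRep_cons_neg _ _ _ _ h1, pvRep_cons_neg _ _ _ _ g2, pvRep_cons_neg _ _ _ _ g3,
                    pvRep_cons_neg _ _ _ _ g4, pvRep_cons_neg _ _ _ _ g5]
                rw [pvScan_cons_none f c t h1 h2 h3 h4 h5]
                intro heq
                injection heq with _ heq'
                exact ih t (by simp at hl; omega) hbt heq'

-- ===== VERDICT (by name: the statement is the Claim_ definition above) =====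
theorem normalize_location_text_py_spec : Claim_unchanged_normalize_location_text_py := by
  intro value hdom
  unfold Spec_normalize_location_text_py
  intro hD
  have hb1 : ¬ ("gurgoanew delhi".toList <:+: (PySem.Str.lower (PySem.Str.strip (value.getD ""))).toList) :=
    fun hq => hD (Or.inl ((PySem.Str.isIn_iff_infix _ _).mpr hq))
  have hb2 : ¬ ("gurugramew delhi".toList <:+: (PySem.Str.lower (PySem.Str.strip (value.getD ""))).toList) :=
    fun hq => hD (Or.inr ((PySem.Str.isIn_iff_infix _ _).mpr hq))
  unfold normalize_location_text_py normalize_location_text_py_alt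
  by_cases ht : PySem.Str.lower (PySem.Str.strip (value.getD "")) = ""
  · simp [ht]
  · simp only [ht, if_false]
    refine String.toList_inj.mp ?_
    rw [String.toList_ofList]
    simp only [pvAliasesA, List.foldl_cons, List.foldl_nil, PySem.Str.toList_replace]
    rw [replace_eq_pvRep _ _ _ (by decide), replace_eq_pvRep _ _ _ (by decide),
        replace_eq_pvRep _ _ _ (by decide), replace_eq_pvRep _ _ _ (by decide),
        replace_eq_pvRep _ _ _ (by decide)]
    exact pvMain _ _ le_rfl hb1 hb2

theorem normalize_location_text_py_changed : Claim_changed_normalize_location_text_py := by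
  unfold Claim_changed_normalize_location_text_py; decide

theorem normalize_location_text_py_tight : Claim_exact_normalize_location_text_py := by
  intro value hdom hD
  have hb : "gurgoanew delhi".toList <:+: (PySem.Str.lower (PySem.Str.strip (value.getD ""))).toList ∨
      "gurugramew delhi".toList <:+: (PySem.Str.lower (PySem.Str.strip (value.getD ""))).toList := by
    rcases hD with h | h
    · exact Or.inl ((PySem.Str.isIn_iff_infix _ _).mp h)
    · exact Or.inr ((PySem.Str.isIn_iff_infix _ _).mp h)
  have ht : ¬ (PySem.Str.lower (PySem.Str.strip (value.getD "")) = "") := by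
    intro h0
    rw [h0] at hb
    rcases hb with hb' | hb' <;> exact absurd (List.eq_nil_of_infix_nil hb') (by decide)
  intro heq
  unfold normalize_location_text_py normalize_location_text_py_alt at heq
  simp only [ht, if_false] at heq
  have hlist := congrArg String.toList heq
  rw [String.toList_ofList] at hlist
  simp only [pvAliasesA, List.foldl_cons, List.foldl_nil, PySem.Str.toList_replace] at hlist
  rw [replace_eq_pvRep _ _ _ (by decide), replace_eq_pvRep _ _ _ (by decide),
      replace_eq_pvRep _ _ _ (by decide), replace_eq_pvRep _ _ _ (by decide),
      replace_eq_pvRep _ _ _ (by decide)] at hlist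
  exact pvMainNe _ _ le_rfl hb hlist
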